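-- pv_equiv track=rewrite | github.com/dbfarias/dbf-poly-agent | bot/research/llm_debate.py | _parse_reviewer
-- ===== SOURCE A (Python) =====
-- def _parse_reviewer(text: str) -> tuple[str, str, str]:
--     """Parse reviewer response. Returns (verdict, urgency, reasoning)."""
--     verdict = "HOLD"
--     urgency = "LOW"
--     reasoning = text
--
--     for line in text.split("\n"):
--         upper = line.upper().strip()
--         if upper.startswith("VERDICT:"):
--             val = upper.split(":", 1)[1].strip()
--             if "EXIT" in val:
--                 verdict = "EXIT"
--             elif "REDUCE" in val:
--                 verdict = "REDUCE"
--             elif "INCREASE" in val: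
--                 verdict = "INCREASE"
--             else:
--                 verdict = "HOLD"
--         elif upper.startswith("URGENCY:"):
--             val = upper.split(":", 1)[1].strip()
--             if "HIGH" in val:
--                 urgency = "HIGH"
--             elif "MEDIUM" in val:
--                 urgency = "MEDIUM"
--             else:
--                 urgency = "LOW"
--         elif upper.startswith("REASONING:"):
--             reasoning = line.split(":", 1)[1].strip()
--
--     return verdict, urgency, reasoning
-- ===== SOURCE B (Python) =====
-- def _parse_reviewer(text: str) -> tuple[str, str, str]:
--     """Parse reviewer response. Returns (verdict, urgency, reasoning)."""
--     lines = text.split("\n")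
--
--     def last_with(prefix):
--         found = None
--         for line in lines:
--             if line.upper().strip().startswith(prefix):
--                 found = line
--         return found
--
--     def tag_value(line):
--         return line.upper().strip().split(":", 1)[1].strip()
--
--     vline = last_with("VERDICT:")
--     if vline is None:
--         verdict = "HOLD"
--     else:
--         val = tag_value(vline)
--         verdict = ("EXIT" if "EXIT" in val
--                    else "REDUCE" if "REDUCE" in val
--                    else "INCREASE" if "INCREASE" in val
--                    else "HOLD")
--
--     uline = last_with("URGENCY:")
--     if uline is None:
--         urgency = "LOW"
--     else:
--         val = tag_value(uline)
--         urgency = ("HIGH" if "HIGH" in val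
--                    else "MEDIUM" if "MEDIUM" in val
--                    else "LOW")
--
--     rline = last_with("REASONING:")
--     reasoning = text if rline is None else rline.split(":", 1)[1].strip()
--
--     return verdict, urgency, reasoning
-- ===== Notes on version B (the rewrite author's own statement) =====
-- stated objective: alternative
-- what changed: A's single stateful pass with an elif chain over a mutable (verdict, urgency, reasoning) triple is replaced by three independent last-match scans, one per tag prefix, each mapping only the last matching line to its value.
import Mathlib
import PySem

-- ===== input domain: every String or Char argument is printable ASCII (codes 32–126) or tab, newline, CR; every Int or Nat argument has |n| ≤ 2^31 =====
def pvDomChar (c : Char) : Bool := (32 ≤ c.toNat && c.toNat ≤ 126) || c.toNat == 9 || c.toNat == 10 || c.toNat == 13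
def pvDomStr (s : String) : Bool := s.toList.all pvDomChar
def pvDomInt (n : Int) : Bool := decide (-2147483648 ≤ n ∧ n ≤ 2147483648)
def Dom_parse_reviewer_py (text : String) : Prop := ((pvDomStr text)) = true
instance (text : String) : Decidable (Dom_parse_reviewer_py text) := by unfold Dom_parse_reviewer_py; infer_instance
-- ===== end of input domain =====

-- B replaces A's single stateful branching pass with three independent last-match scans
-- (one per tag), a different decomposition of the same parse; same cost, no speed claim.

-- ===== PORT A =====
-- one loop step of A's for-loop: the elif chain updating (verdict, urgency, reasoning)
def pvStepA (st : String × String × String) (line : String) : String × String × String :=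
  let upper := PySem.Str.strip (PySem.Str.upper line)
  if PySem.Str.startswith upper "VERDICT:" then
    -- upper.split(":", 1)[1] — the index exists because upper starts with "VERDICT:" (getD "" unreachable)
    let val := PySem.Str.strip ((PySem.List.pyGet? ((PySem.Str.splitMax? upper ":" 1).getD []) 1).getD "")
    let v := if PySem.Str.isIn "EXIT" val then "EXIT"
             else if PySem.Str.isIn "REDUCE" val then "REDUCE"
             else if PySem.Str.isIn "INCREASE" val then "INCREASE"
             else "HOLD"
    (v, st.2.1, st.2.2)
  else if PySem.Str.startswith upper "URGENCY:" then
    let val := PySem.Str.strip ((PySem.List.pyGet? ((PySem.Str.splitMax? upper ":" 1).getD []) 1).getD "")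
    let u := if PySem.Str.isIn "HIGH" val then "HIGH"
             else if PySem.Str.isIn "MEDIUM" val then "MEDIUM"
             else "LOW"
    (st.1, u, st.2.2)
  else if PySem.Str.startswith upper "REASONING:" then
    (st.1, st.2.1, PySem.Str.strip ((PySem.List.pyGet? ((PySem.Str.splitMax? line ":" 1).getD []) 1).getD ""))
  else st

def parse_reviewer_py (text : String) : String × String × String :=
  -- text.split("\n"): split? is none only for sep = "", so getD [] is unreachable
  ((PySem.Str.split? text "\n").getD []).foldl pvStepA ("HOLD", "LOW", text)

-- ===== PORT B =====
-- Source B's last_with: last line whose upper().strip() starts with the prefix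
def pvLastWith (pre : String) (lines : List String) : Option String :=
  lines.foldl (fun found line =>
    if PySem.Str.startswith (PySem.Str.strip (PySem.Str.upper line)) pre then some line else found) none

-- Source B's tag_value: line.upper().strip().split(":", 1)[1].strip() (index exists under the prefix guard)
def pvTagValue (line : String) : String :=
  PySem.Str.strip ((PySem.List.pyGet? ((PySem.Str.splitMax? (PySem.Str.strip (PySem.Str.upper line)) ":" 1).getD []) 1).getD "")

def pvVerdictOf (line : String) : String :=
  let val := pvTagValue line
  if PySem.Str.isIn "EXIT" val then "EXIT"
  else if PySem.Str.isIn "REDUCE" val then "REDUCE"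
  else if PySem.Str.isIn "INCREASE" val then "INCREASE"
  else "HOLD"

def pvUrgencyOf (line : String) : String :=
  let val := pvTagValue line
  if PySem.Str.isIn "HIGH" val then "HIGH"
  else if PySem.Str.isIn "MEDIUM" val then "MEDIUM"
  else "LOW"

def pvReasoningOf (line : String) : String :=
  PySem.Str.strip ((PySem.List.pyGet? ((PySem.Str.splitMax? line ":" 1).getD []) 1).getD "")

def parse_reviewer_py_alt (text : String) : String × String × String :=
  let lines := (PySem.Str.split? text "\n").getD []
  let verdict := match pvLastWith "VERDICT:" lines with
    | none => "HOLD"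
    | some l => pvVerdictOf l
  let urgency := match pvLastWith "URGENCY:" lines with
    | none => "LOW"
    | some l => pvUrgencyOf l
  let reasoning := match pvLastWith "REASONING:" lines with
    | none => text
    | some l => pvReasoningOf l
  (verdict, urgency, reasoning)

-- ===== PRECONDITION & SPEC =====
def Spec_parse_reviewer_py (text : String) (out : String × String × String) : Prop := out = parse_reviewer_py_alt text
instance (text : String) (out : String × String × String) : Decidable (Spec_parse_reviewer_py text out) := by unfold Spec_parse_reviewer_py; infer_instance

-- ===== CLAIM (what is proved, stated in full; the proofs are below) =====
def Claim_equal_parse_reviewer_py : Prop := ∀ (text : String), Dom_parse_reviewer_py text → Spec_parse_reviewer_py text (parse_reviewer_py text)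

-- ===== LEMMAS AND PROOFS =====

-- the three tag prefixes are mutually exclusive (they differ in their first character)
lemma pv_not_urgency_of_verdict (s : String)
    (h : PySem.Str.startswith s "VERDICT:" = true) :
    PySem.Str.startswith s "URGENCY:" = false := by
  simp only [PySem.Str.startswith, PySem.Chars.startswith] at h ⊢
  generalize s.toList = l at h ⊢
  cases l <;> simp_all [List.isPrefixOf]
  intro hU; cases hU; exact absurd h.1 (by decide)

lemma pv_not_reasoning_of_verdict (s : String)
    (h : PySem.Str.startswith s "VERDICT:" = true) :
    PySem.Str.startswith s "REASONING:" = false := by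
  simp only [PySem.Str.startswith, PySem.Chars.startswith] at h ⊢
  generalize s.toList = l at h ⊢
  cases l <;> simp_all [List.isPrefixOf]
  intro hR; cases hR; exact absurd h.1 (by decide)

lemma pv_not_reasoning_of_urgency (s : String)
    (h : PySem.Str.startswith s "URGENCY:" = true) :
    PySem.Str.startswith s "REASONING:" = false := by
  simp only [PySem.Str.startswith, PySem.Chars.startswith] at h ⊢
  generalize s.toList = l at h ⊢
  cases l <;> simp_all [List.isPrefixOf]
  intro hR; cases hR; exact absurd h.1 (by decide)

-- a last-match fold from an arbitrary accumulator = the fold from none, with acc as fallback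
lemma pv_foldl_last_or (p : String → Bool) :
    ∀ (ls : List String) (acc : Option String),
      ls.foldl (fun f l => if p l then some l else f) acc
        = (ls.foldl (fun f l => if p l then some l else f) none).or acc := by
  intro ls
  induction ls with
  | nil => intro acc; simp
  | cons l ls ih =>
    intro acc
    simp only [List.foldl_cons]
    rw [ih, ih (if p l then some l else none)]
    cases hp : p l <;> simp

lemma pvLastWith_cons (pre l : String) (ls : List String) :
    pvLastWith pre (l :: ls)
      = (pvLastWith pre ls).or
          (if PySem.Str.startswith (PySem.Str.strip (PySem.Str.upper l)) pre then some l else none) := by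
  simp only [pvLastWith, List.foldl_cons]
  exact pv_foldl_last_or _ ls _

lemma pv_elim_or (x a : Option String) (v : String) (g : String → String) :
    (x.or a).elim v g = x.elim (a.elim v g) g := by
  cases x <;> simp

-- A's fold, started from any state, computes B's three last-match scans componentwise
lemma pv_fold_eq (ls : List String) :
    ∀ (v u r : String),
      ls.foldl pvStepA (v, u, r)
        = ((pvLastWith "VERDICT:" ls).elim v pvVerdictOf,
           (pvLastWith "URGENCY:" ls).elim u pvUrgencyOf,
           (pvLastWith "REASONING:" ls).elim r pvReasoningOf) := by
  induction ls with
  | nil => intro v u r; simp [pvLastWith]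
  | cons l ls ih =>
    intro v u r
    rw [List.foldl_cons, pvLastWith_cons, pvLastWith_cons, pvLastWith_cons,
        pv_elim_or, pv_elim_or, pv_elim_or]
    cases hv : PySem.Str.startswith (PySem.Str.strip (PySem.Str.upper l)) "VERDICT:"
    case true =>
      have hu := pv_not_urgency_of_verdict _ hv
      have hr := pv_not_reasoning_of_verdict _ hv
      have hst : pvStepA (v, u, r) l = (pvVerdictOf l, u, r) := by
        unfold pvStepA pvVerdictOf pvTagValue
        rw [if_pos hv]
      rw [hst, ih, hu, hr]; simp
    case false =>
      cases hu : PySem.Str.startswith (PySem.Str.strip (PySem.Str.upper l)) "URGENCY:"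
      case true =>
        have hr := pv_not_reasoning_of_urgency _ hu
        have hst : pvStepA (v, u, r) l = (v, pvUrgencyOf l, r) := by
          unfold pvStepA pvUrgencyOf pvTagValue
          rw [if_neg (by rw [hv]; simp), if_pos hu]
        rw [hst, ih, hr]; simp
      case false =>
        cases hr : PySem.Str.startswith (PySem.Str.strip (PySem.Str.upper l)) "REASONING:"
        case true =>
          have hst : pvStepA (v, u, r) l = (v, u, pvReasoningOf l) := by
            unfold pvStepA pvReasoningOf
            rw [if_neg (by rw [hv]; simp), if_neg (by rw [hu]; simp), if_pos hr]
          rw [hst, ih]; simp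
        case false =>
          have hst : pvStepA (v, u, r) l = (v, u, r) := by
            unfold pvStepA
            rw [if_neg (by rw [hv]; simp), if_neg (by rw [hu]; simp), if_neg (by rw [hr]; simp)]
          rw [hst, ih]; simp

-- ===== VERDICT (by name: the statement is the Claim_ definition above) =====
theorem parse_reviewer_py_spec : Claim_equal_parse_reviewer_py := by
  intro text _
  unfold Spec_parse_reviewer_py parse_reviewer_py parse_reviewer_py_alt
  rw [pv_fold_eq]
  cases hV : pvLastWith "VERDICT:" ((PySem.Str.split? text "\n").getD []) <;>
  cases hU : pvLastWith "URGENCY:" ((PySem.Str.split? text "\n").getD []) <;>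
  cases hR : pvLastWith "REASONING:" ((PySem.Str.split? text "\n").getD []) <;>
    simp [hV, hU, hR]
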